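-- pv_equiv track=rewrite | github.com/pypi-data/pypi-mirror-47 | packages/pyhasse.fuzzy/pyhasse.fuzzy-0.1.1.tar.gz/pyhasse.fuzzy-0.1.1/src/pyhasse/fuzzy/calc.py | calc_countofcomparab
-- ===== SOURCE A (Python) =====
-- def calc_countofcomparab(matrix):
--         """ computes the comparabilities
--         based on square matrix (r rows, r columns).
--         :prop:
--         |** matrix**: zeta matrix (square matrix)
--         |** r **: number of rows/columns
--         """
--         r = len(matrix)
--         comparabilities = 0
--         for i1 in range(0, r):
--             for i2 in range(0, r):
--                 if matrix[i1][i2] == 1 and i1 != i2: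
--                     comparabilities += 1
--         return comparabilities
-- ===== SOURCE B (Python) =====
-- def calc_countofcomparab(matrix):
--     r = len(matrix)
--     total = sum(row[:r].count(1) for row in matrix)
--     diag = sum(1 for i in range(r) if matrix[i][i] == 1)
--     return total - diag
-- ===== Notes on version B (the rewrite author's own statement) =====
-- stated objective: simpler
-- what changed: A's single nested scan guarded by 'i1 != i2' is replaced by two separate flat passes: a per-row count of ones in row[:r] summed over the rows, and a diagonal pass counting matrix[i][i] == 1, returning total minus diagonal.
import Mathlib
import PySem

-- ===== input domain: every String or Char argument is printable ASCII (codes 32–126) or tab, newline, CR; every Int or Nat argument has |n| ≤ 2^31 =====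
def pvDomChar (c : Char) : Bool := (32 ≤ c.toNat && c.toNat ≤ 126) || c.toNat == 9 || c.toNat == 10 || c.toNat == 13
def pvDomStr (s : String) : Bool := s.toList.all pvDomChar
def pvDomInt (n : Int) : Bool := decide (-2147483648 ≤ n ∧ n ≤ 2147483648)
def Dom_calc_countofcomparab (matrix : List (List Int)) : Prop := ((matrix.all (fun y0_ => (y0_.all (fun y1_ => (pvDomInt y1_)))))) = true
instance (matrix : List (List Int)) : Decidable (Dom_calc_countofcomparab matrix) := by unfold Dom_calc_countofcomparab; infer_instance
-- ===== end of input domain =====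

-- B replaces A's guarded nested scan ('count 1s where i1 != i2') by two separate passes:
-- a per-row count of ones in row[:r] summed over the rows, minus a single diagonal pass (objective: simpler).

-- ===== PORT A =====
def calc_countofcomparab (matrix : List (List Int)) : Int :=
  let r : Int := matrix.length
  (PySem.List.pyRange 0 r 1).foldl (fun comparabilities i1 =>
    (PySem.List.pyRange 0 r 1).foldl (fun comparabilities i2 =>
      if PySem.List.pyGetD (PySem.List.pyGetD matrix i1 []) i2 0 = 1 ∧ i1 ≠ i2
      then comparabilities + 1 else comparabilities) comparabilities) 0

-- ===== PORT B =====
def calc_countofcomparab_alt (matrix : List (List Int)) : Int :=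
  let r : Int := matrix.length
  let total : Int := (matrix.map (fun row => ((PySem.List.slice row none (some r)).count 1 : Int))).sum
  let diag : Int := (PySem.List.pyRange 0 r 1).foldl (fun acc i =>
    if PySem.List.pyGetD (PySem.List.pyGetD matrix i []) i 0 = 1 then acc + 1 else acc) 0
  total - diag

-- ===== PRECONDITION & SPEC =====
-- Pre_ excludes ragged inputs with a row shorter than the number of rows, on which A raises IndexError.
def Pre_calc_countofcomparab (matrix : List (List Int)) : Prop :=
  ∀ row ∈ matrix, matrix.length ≤ row.length
instance (matrix : List (List Int)) : Decidable (Pre_calc_countofcomparab matrix) := by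
  unfold Pre_calc_countofcomparab; infer_instance
def pvWitness_calc_countofcomparab : List (List Int) := [[1, 1], [0, 1]]

def Spec_calc_countofcomparab (matrix : List (List Int)) (out : Int) : Prop := out = calc_countofcomparab_alt matrix
instance (matrix : List (List Int)) (out : Int) : Decidable (Spec_calc_countofcomparab matrix out) := by unfold Spec_calc_countofcomparab; infer_instance

-- ===== CLAIM (what is proved, stated in full; the proofs are below) =====
def Claim_equal_calc_countofcomparab : Prop := ∀ (matrix : List (List Int)), Dom_calc_countofcomparab matrix → Pre_calc_countofcomparab matrix → Spec_calc_countofcomparab matrix (calc_countofcomparab matrix)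

-- ===== LEMMAS AND PROOFS =====

-- take n of a long-enough list, written as a map over range n
lemma take_eq_map_range {α : Type} [Inhabited α] (xs : List α) (n : Nat) (h : n ≤ xs.length) :
    (List.range n).map (fun i => xs.getD i default) = xs.take n := by
  apply List.ext_getElem
  · simp [h]
  · intro i h1 h2
    simp only [List.length_map, List.length_range] at h1
    simp only [List.getElem_map, List.getElem_range, List.getElem_take]
    rw [List.getD_eq_getElem xs default (by omega)]

-- countP of 'p i ∧ i ≠ i1' over a nodup list containing i1, vs plain countP of p
lemma countP_and_ne (l : List Nat) (hnd : l.Nodup) (i1 : Nat) (hm : i1 ∈ l) (p : Nat → Bool) :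
    l.countP (fun i => p i && !(i == i1)) + (if p i1 then 1 else 0) = l.countP p := by
  induction l with
  | nil => simp at hm
  | cons x t ih =>
    simp only [List.nodup_cons] at hnd
    rcases List.mem_cons.mp hm with hx | ht
    · subst hx
      have hcnt : t.countP (fun i => p i && !(i == i1)) = t.countP p := by
        apply List.countP_congr
        intro i hi
        have hne : i ≠ i1 := fun h => hnd.1 (h ▸ hi)
        simp [hne]
      simp only [List.countP_cons, hcnt]
      cases hp : p i1 <;> simp
    · have hxne : (x == i1) = false := by
        simp only [beq_eq_false_iff_ne, ne_eq]
        exact fun h => hnd.1 (h ▸ ht)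
      have ih' := ih hnd.2 ht
      simp only [List.countP_cons, hxne, Bool.not_false, Bool.and_true]
      cases hp : p x <;> simp <;> omega

-- count of ones in take n, as a countP over range n
lemma count_take_eq_countP (row : List Int) (n : Nat) (h : n ≤ row.length) :
    (row.take n).count 1 = (List.range n).countP (fun i => row.getD i 0 == 1) := by
  rw [← take_eq_map_range row n h]
  simp [List.count, List.countP_map]
  apply List.countP_congr
  intro i _
  simp [BEq.comm]

-- the inner loop of A, for a fixed valid row index
lemma inner_count (row : List Int) (n i1 : Nat) (hrow : n ≤ row.length) (hi : i1 < n) :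
    ((List.range n).countP (fun i => row.getD i 0 == 1 && !(i == i1)) : Int)
      = ((row.take n).count 1 : Int) - (if row.getD i1 0 = 1 then 1 else 0) := by
  have h := countP_and_ne (List.range n) (List.nodup_range) i1 (List.mem_range.mpr hi)
      (fun i => row.getD i 0 == 1)
  rw [count_take_eq_countP row n hrow]
  have : (if (row.getD i1 0 == 1) = true then (1:Nat) else 0) = (if row.getD i1 0 = 1 then 1 else 0) := by
    simp
  split_ifs at h ⊢ with hc
  all_goals simp_all
  all_goals omega

-- a 0/1 Int sum over range n is a countP
lemma sum_ite_diag (matrix : List (List Int)) (n : Nat) :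
    ((List.range n).map (fun i => if (matrix.getD i []).getD i 0 = 1 then (1:Int) else 0)).sum
      = ((List.range n).countP (fun i => (matrix.getD i []).getD i 0 == 1) : Int) := by
  induction n with
  | zero => simp
  | succ m ih =>
    rw [List.range_succ]
    simp only [List.map_append, List.sum_append, List.countP_append, ih,
      List.map_cons, List.map_nil, List.sum_cons, List.sum_nil, List.countP_cons, List.countP_nil]
    simp

-- Int sum of a pointwise difference
lemma sum_map_sub (l : List Nat) (f g : Nat → Int) :
    (l.map (fun i => f i - g i)).sum = (l.map f).sum - (l.map g).sum := by
  induction l with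
  | nil => simp
  | cons x t ih => simp [ih]; ring

theorem calc_countofcomparab_spec : Claim_equal_calc_countofcomparab := by
  intro matrix _ hpre
  unfold Spec_calc_countofcomparab calc_countofcomparab calc_countofcomparab_alt
  simp only [PySem.List.pyRange_zero_natCast, List.foldl_map, PySem.List.pyGetD_natCast,
    PySem.List.slice_to_natCast, ne_eq, Nat.cast_inj]
  set n := matrix.length with hn
  -- A's inner loop as a countP
  have hinner : ∀ (i1 : Nat) (a : Int),
      (List.range n).foldl (fun acc i2 =>
        if (matrix.getD i1 []).getD i2 0 = 1 ∧ ¬ i1 = i2 then acc + 1 else acc) a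
      = a + ((List.range n).countP (fun i2 => (matrix.getD i1 []).getD i2 0 == 1 && !(i2 == i1)) : Int) := by
    intro i1 a
    have hb : (fun (acc : Int) (i2 : Nat) =>
        if (matrix.getD i1 []).getD i2 0 = 1 ∧ ¬ i1 = i2 then acc + 1 else acc)
        = (fun acc i2 => if ((matrix.getD i1 []).getD i2 0 == 1 && !(i2 == i1)) = true
            then acc + 1 else acc) := by
      funext acc i2
      simp only [Bool.and_eq_true, beq_iff_eq, Bool.not_eq_true', beq_eq_false_iff_ne, ne_eq]
      apply if_congr _ rfl rfl
      constructor <;> exact fun h => ⟨h.1, fun he => h.2 he.symm⟩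
    rw [hb, PySem.List.foldl_count_if]
  -- B's diagonal loop as a countP
  have hdiag : (List.range n).foldl (fun acc i =>
      if (matrix.getD i []).getD i 0 = 1 then acc + 1 else acc) (0:Int)
      = ((List.range n).countP (fun i => (matrix.getD i []).getD i 0 == 1) : Int) := by
    have hb : (fun (acc : Int) (i : Nat) => if (matrix.getD i []).getD i 0 = 1 then acc + 1 else acc)
        = (fun acc i => if ((matrix.getD i []).getD i 0 == 1) = true then acc + 1 else acc) := by
      funext acc i
      simp
    rw [hb, PySem.List.foldl_count_if]
    simp
  -- A's outer loop as a sum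
  have houter : (List.range n).foldl (fun acc i1 => (List.range n).foldl (fun acc2 i2 =>
        if (matrix.getD i1 []).getD i2 0 = 1 ∧ ¬ i1 = i2 then acc2 + 1 else acc2) acc) (0:Int)
      = ((List.range n).map (fun i1 =>
          ((List.range n).countP (fun i2 => (matrix.getD i1 []).getD i2 0 == 1 && !(i2 == i1)) : Int))).sum := by
    have hb : (fun (acc : Int) (i1 : Nat) => (List.range n).foldl (fun acc2 i2 =>
        if (matrix.getD i1 []).getD i2 0 = 1 ∧ ¬ i1 = i2 then acc2 + 1 else acc2) acc)
        = (fun acc i1 => acc + ((List.range n).countP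
            (fun i2 => (matrix.getD i1 []).getD i2 0 == 1 && !(i2 == i1)) : Int)) := by
      funext acc i1; exact hinner i1 acc
    rw [hb, PySem.List.foldl_add]
    simp
  -- B's total as a sum over row indices
  have htotal : (matrix.map (fun row => ((List.take n row).count 1 : Int))).sum
      = ((List.range n).map (fun i1 => (((matrix.getD i1 []).take n).count 1 : Int))).sum := by
    conv_lhs => rw [show matrix = matrix.take n from (List.take_length).symm,
      ← take_eq_map_range matrix n (le_refl n)]
    rw [List.map_map]
    rfl
  rw [houter, hdiag, htotal]
  rw [← sum_ite_diag, ← sum_map_sub]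
  apply congrArg
  apply List.map_congr_left
  intro i1 hi1
  have hi1n : i1 < n := List.mem_range.mp hi1
  have hrow : matrix.getD i1 [] ∈ matrix := by
    rw [List.getD_eq_getElem matrix [] hi1n]; exact List.getElem_mem _
  exact inner_count (matrix.getD i1 []) n i1 (hpre _ hrow) hi1n
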